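-- pv_equiv track=rewrite | github.com/ModelDBRepository/261864 | data/genData_ImpulseNoise.py | findDynamicRange
-- ===== SOURCE A (Python) =====
-- def findDynamicRange(odors_raw):
--     nSensors = len(odors_raw[0]);
--     dRange = [[0,0]]*nSensors;          #(min, max) for each sensor
--     for i in range(0, len(odors_raw)):
--         for j in range(0, nSensors):  #+1 because 0 is timestamp
--             if(i==0):
--                 dRange[j] = [odors_raw[i][j], odors_raw[i][j]];
--             elif odors_raw[i][j] < dRange[j][0]:     #new < min
--                 dRange[j][0] = odors_raw[i][j];
--             elif odors_raw[i][j] > dRange[j][1]:     #new > max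
--                 dRange[j][1] = odors_raw[i][j];
--     return dRange;
-- ===== SOURCE B (Python) =====
-- def findDynamicRange(odors_raw):
--     nSensors = len(odors_raw[0])
--     dRange = []
--     for j in range(nSensors):
--         col = [row[j] for row in odors_raw]
--         dRange.append([min(col), max(col)])
--     return dRange
-- ===== Notes on version B (the rewrite author's own statement) =====
-- stated objective: simpler
-- what changed: Column-major decomposition: each sensor's [min, max] is computed independently with the min/max built-ins over the gathered column, instead of a row-major single pass maintaining running (min, max) cells with a special-cased first row.
import Mathlib
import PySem

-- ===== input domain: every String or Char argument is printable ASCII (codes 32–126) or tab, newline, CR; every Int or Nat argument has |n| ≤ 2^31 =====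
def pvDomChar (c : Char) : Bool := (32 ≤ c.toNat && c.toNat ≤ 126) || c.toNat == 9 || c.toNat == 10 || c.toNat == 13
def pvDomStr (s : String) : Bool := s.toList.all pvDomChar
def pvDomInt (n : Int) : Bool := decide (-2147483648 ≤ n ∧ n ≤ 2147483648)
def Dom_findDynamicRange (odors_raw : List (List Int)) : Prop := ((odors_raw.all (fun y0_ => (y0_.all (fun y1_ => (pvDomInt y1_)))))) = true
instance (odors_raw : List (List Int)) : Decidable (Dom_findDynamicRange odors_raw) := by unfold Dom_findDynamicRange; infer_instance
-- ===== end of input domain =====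

-- B computes each sensor's [min, max] column-wise with the min/max built-ins instead of A's
-- row-major running-update pass; the return values agree on every input admitted by Pre_.
-- (A mutates its local dRange cells only; the argument itself is never mutated.)

-- ===== PORT A =====
-- row-major pass: dRange starts as nSensors copies of [0,0]; the i = 0 row initialises each
-- cell, later rows update the cell's min/max in place.  Python's odors_raw[i] is the enumerated
-- row; row indexing uses getD, exact because Pre_ keeps every index j in range.
def findDynamicRange (odors_raw : List (List Int)) : List (List Int) :=
  (PySem.List.enumerate odors_raw 0).foldl (fun dRange p =>
    (List.range (odors_raw.headD []).length).foldl (fun dR j =>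
      let x := p.2.getD j 0
      if p.1 = 0 then
        dR.set j [x, x]
      else if x < (dR.getD j []).getD 0 0 then
        dR.set j [x, (dR.getD j []).getD 1 0]
      else if x > (dR.getD j []).getD 1 0 then
        dR.set j [(dR.getD j []).getD 0 0, x]
      else dR) dRange)
    (List.replicate (odors_raw.headD []).length ([0, 0] : List Int))

-- ===== PORT B =====
-- column-major: for each sensor j gather the column and append [min(col), max(col)].
def findDynamicRange_alt (odors_raw : List (List Int)) : List (List Int) :=
  (List.range (odors_raw.headD []).length).foldl (fun dRange j =>
    let col := odors_raw.map (fun row => row.getD j 0)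
    dRange ++ [[(PySem.List.min? col (fun y => y)).getD 0,
                (PySem.List.max? col (fun y => y)).getD 0]]) []

-- ===== PRECONDITION & SPEC =====
-- Pre_ excludes exactly the inputs where the Python A raises IndexError: the empty list
-- (odors_raw[0]) and inputs having a row shorter than the first row (odors_raw[i][j]).
def Pre_findDynamicRange (odors_raw : List (List Int)) : Prop :=
  odors_raw ≠ [] ∧ ∀ row ∈ odors_raw, (odors_raw.headD []).length ≤ row.length
instance (odors_raw : List (List Int)) : Decidable (Pre_findDynamicRange odors_raw) := by
  unfold Pre_findDynamicRange; infer_instance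

def pvWitness_findDynamicRange : List (List Int) := [[3, 1], [0, 5], [2, 2]]

def Spec_findDynamicRange (odors_raw : List (List Int)) (out : List (List Int)) : Prop := out = findDynamicRange_alt odors_raw
instance (odors_raw : List (List Int)) (out : List (List Int)) : Decidable (Spec_findDynamicRange odors_raw out) := by unfold Spec_findDynamicRange; infer_instance

-- ===== CLAIM (what is proved, stated in full; the proofs are below) =====
def Claim_equal_findDynamicRange : Prop := ∀ (odors_raw : List (List Int)), Dom_findDynamicRange odors_raw → Pre_findDynamicRange odors_raw → Spec_findDynamicRange odors_raw (findDynamicRange odors_raw)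

-- ===== LEMMAS AND PROOFS =====

-- A's min/max update of one cell (the i ≠ 0 inner-loop body on cell c with new value x)
def pvUpd (c : List Int) (x : Int) : List Int :=
  if x < c.getD 0 0 then [x, c.getD 1 0]
  else if x > c.getD 1 0 then [c.getD 0 0, x]
  else c

-- a list equals the range-indexed map of its getD values
lemma map_range_getD (L : List (List Int)) :
    (List.range L.length).map (fun j => L.getD j []) = L := by
  apply List.ext_getElem
  · simp
  · intro k h1 h2
    simp [List.getD_eq_getElem?_getD, List.getElem?_eq_getElem h2]

-- a fold over range n whose step only rewrites cell j from the cell's own old value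
lemma foldl_range_set (g : List (List Int) → Nat → List (List Int))
    (u : Nat → List Int → List Int)
    (h : ∀ L j, j < L.length → g L j = L.set j (u j (L.getD j []))) :
    ∀ (n : Nat) (L : List (List Int)), n ≤ L.length →
    (List.range n).foldl g L
      = (List.range L.length).map (fun j => if j < n then u j (L.getD j []) else L.getD j []) := by
  intro n
  induction n with
  | zero =>
      intro L _
      simpa using (map_range_getD L).symm
  | succ n ih =>
      intro L hL
      rw [List.range_succ, List.foldl_append, List.foldl_cons, List.foldl_nil,
        ih L (by omega), h _ _ (by simp; omega)]
      apply List.ext_getElem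
      · simp
      · intro k h1 h2
        simp only [List.getElem_set, List.getElem_map, List.getElem_range,
          List.getD_eq_getElem?_getD, List.getElem?_map] at *
        simp only [List.length_set, List.length_map, List.length_range] at h1 h2
        rw [List.getElem?_range (by omega)]
        rcases Nat.lt_trichotomy k n with hk | hk | hk <;>
          simp [hk, Nat.ne_of_gt, Nat.ne_of_lt, hk.le]
        rw [if_neg (by omega), if_neg (by omega)]

-- the same fold started from a range-indexed map state
lemma foldl_range_set_map (g : List (List Int) → Nat → List (List Int))
    (u : Nat → List Int → List Int)
    (h : ∀ L j, j < L.length → g L j = L.set j (u j (L.getD j [])))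
    (n : Nat) (f : Nat → List Int) :
    (List.range n).foldl g ((List.range n).map f)
      = (List.range n).map (fun j => u j (f j)) := by
  rw [foldl_range_set g u h n _ (by simp)]
  apply List.ext_getElem
  · simp
  · intro k h1 h2
    simp only [List.length_map, List.length_range] at h1 h2
    simp [List.getD_eq_getElem?_getD, List.getElem?_map, h1]

-- A's coupled if/elif update on a well-ordered cell [m, M] is exactly (min, max)
lemma pvUpd_minmax (m M x : Int) (hmM : m ≤ M) :
    pvUpd [m, M] x = [min m x, max M x] := by
  unfold pvUpd
  simp only [List.getD]
  split_ifs <;> simp_all <;> omega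

-- processing the tail rows (all enumerate indices ≥ 1) folds min/max column-wise
lemma tail_fold (n : Nat) (rest : List (List Int)) :
    ∀ (s : Int) (f : Nat → Int × Int), 1 ≤ s → (∀ j, (f j).1 ≤ (f j).2) →
    (PySem.List.enumerate rest s).foldl
      (fun dRange p =>
        (List.range n).foldl (fun dR j =>
          let x := p.2.getD j 0
          if p.1 = 0 then dR.set j [x, x]
          else if x < (dR.getD j []).getD 0 0 then dR.set j [x, (dR.getD j []).getD 1 0]
          else if x > (dR.getD j []).getD 1 0 then dR.set j [(dR.getD j []).getD 0 0, x]
          else dR) dRange)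
      ((List.range n).map (fun j => [(f j).1, (f j).2]))
    = (List.range n).map (fun j =>
        [(rest.map (fun row => row.getD j 0)).foldl min (f j).1,
         (rest.map (fun row => row.getD j 0)).foldl max (f j).2]) := by
  induction rest with
  | nil =>
      intro s f hs hf
      simp [PySem.List.enumerate]
  | cons r rest ih =>
      intro s f hs hf
      rw [PySem.List.enumerate_cons, List.foldl_cons]
      have hstep : (List.range n).foldl (fun dR j =>
          let x := ((s, r) : Int × List Int).2.getD j 0
          if ((s, r) : Int × List Int).1 = 0 then dR.set j [x, x]
          else if x < (dR.getD j []).getD 0 0 then dR.set j [x, (dR.getD j []).getD 1 0]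
          else if x > (dR.getD j []).getD 1 0 then dR.set j [(dR.getD j []).getD 0 0, x]
          else dR) ((List.range n).map (fun j => [(f j).1, (f j).2]))
          = (List.range n).map (fun j => pvUpd [(f j).1, (f j).2] (r.getD j 0)) := by
        refine foldl_range_set_map _ (fun j c => pvUpd c (r.getD j 0)) ?_ n
          (fun j => [(f j).1, (f j).2])
        intro L j hj
        have hs0 : ¬ (s = 0) := by omega
        simp only [hs0, if_false]
        unfold pvUpd
        split_ifs
        · rfl
        · rfl
        · rw [List.getD_eq_getElem _ _ hj, List.set_getElem_self]
      rw [hstep]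
      have hmap : (List.range n).map (fun j => pvUpd [(f j).1, (f j).2] (r.getD j 0))
          = (List.range n).map (fun j =>
              [(min (f j).1 (r.getD j 0), max (f j).2 (r.getD j 0)).1,
               (min (f j).1 (r.getD j 0), max (f j).2 (r.getD j 0)).2]) := by
        apply List.map_congr_left
        intro j _
        rw [pvUpd_minmax _ _ _ (hf j)]
      rw [hmap, ih (s + 1) _ (by omega) (fun j => by
        simp only []
        exact le_trans (le_trans (min_le_left _ _) (hf j)) (le_max_left _ _))]
      simp only [List.map_cons, List.foldl_cons]

-- ===== VERDICT (by name: the statement is the Claim_ definition above) =====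
theorem findDynamicRange_spec : Claim_equal_findDynamicRange := by
  intro odors_raw _ hpre
  unfold Spec_findDynamicRange
  obtain ⟨hne, -⟩ := hpre
  cases odors_raw with
  | nil => exact absurd rfl hne
  | cons r0 rest =>
      unfold findDynamicRange findDynamicRange_alt
      simp only [List.headD_cons]
      rw [PySem.List.enumerate_cons, List.foldl_cons]
      have hrep : (List.replicate r0.length ([0, 0] : List Int))
          = (List.range r0.length).map (fun _ => ([0, 0] : List Int)) := by
        simp [List.map_const']
      rw [hrep]
      have h0 : (List.range r0.length).foldl (fun dR j =>
          let x := (((0 : Int), r0) : Int × List Int).2.getD j 0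
          if (((0 : Int), r0) : Int × List Int).1 = 0 then dR.set j [x, x]
          else if x < (dR.getD j []).getD 0 0 then dR.set j [x, (dR.getD j []).getD 1 0]
          else if x > (dR.getD j []).getD 1 0 then dR.set j [(dR.getD j []).getD 0 0, x]
          else dR) ((List.range r0.length).map (fun _ => ([0, 0] : List Int)))
          = (List.range r0.length).map (fun j => [r0.getD j 0, r0.getD j 0]) := by
        refine foldl_range_set_map _ (fun j _ => [r0.getD j 0, r0.getD j 0]) ?_ _ _
        intro L j hj
        simp
      rw [h0]
      have ht := tail_fold r0.length rest 1 (fun j => (r0.getD j 0, r0.getD j 0))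
        (by omega) (fun j => le_refl _)
      simp only [] at ht
      simp only [zero_add]
      rw [ht, PySem.List.foldl_append_singleton_eq_map]
      simp only [List.nil_append, List.map_cons]
      apply List.map_congr_left
      intro j _
      rw [PySem.List.min?_id_cons, PySem.List.max?_id_cons]
      simp
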